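-- pv_equiv track=rewrite | github.com/huijiecai/stock-skills | .cursor/skills/module-bench-diagnosis/scripts/fetch_gitlab_log.py | extract_error_lines
-- ===== SOURCE A (Python) =====
-- def extract_error_lines(log_content, context_lines=3):
--     """
--     提取包含 error 关键词的行及其上下文
--     """
--     lines = log_content.split('\n')
--     error_indices = set()
--
--     error_keywords = [
--         'error', 'ERROR', 'Error',
--         'failed', 'FAILED', 'Failed',
--         'fatal', 'FATAL', 'Fatal'
--     ]
--
--     for i, line in enumerate(lines):
--         for keyword in error_keywords:
--             if keyword in line:
--                 start = max(0, i - context_lines)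
--                 end = min(len(lines), i + context_lines + 1)
--                 error_indices.update(range(start, end))
--                 break
--
--     error_indices = sorted(error_indices)
--
--     if not error_indices:
--         return [], []
--
--     merged_ranges = []
--     start = error_indices[0]
--     end = error_indices[0]
--
--     for idx in error_indices[1:]:
--         if idx == end + 1:
--             end = idx
--         else:
--             merged_ranges.append((start, end))
--             start = idx
--             end = idx
--     merged_ranges.append((start, end))
--
--     result_lines = []
--     for start, end in merged_ranges:
--         if result_lines:
--             result_lines.append("..." + "=" * 70 + "...")
--         for i in range(start, end + 1):
--             result_lines.append(f"[Line {i+1:6d}] {lines[i]}")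
--
--     return result_lines, error_indices
-- ===== SOURCE B (Python) =====
-- def extract_error_lines(log_content, context_lines=3):
--     """
--     Same result as A, computed without the index set / sort / interval merge:
--     mark keyword lines once, pick each line whose window contains a marked line,
--     and emit separators at gaps in a single pass.
--     """
--     lines = log_content.split('\n')
--     n = len(lines)
--     keywords = ('error', 'ERROR', 'Error',
--                 'failed', 'FAILED', 'Failed',
--                 'fatal', 'FATAL', 'Fatal')
--     mark = [any(kw in line for kw in keywords) for line in lines]
--
--     def near_error(j):
--         lo = max(0, j - context_lines)
--         hi = min(n, j + context_lines + 1)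
--         return lo < hi and any(mark[lo:hi])
--
--     error_indices = [j for j in range(n) if near_error(j)]
--
--     result_lines = []
--     prev = None
--     for j in error_indices:
--         if result_lines and j != prev + 1:
--             result_lines.append("..." + "=" * 70 + "...")
--         result_lines.append(f"[Line {j+1:6d}] {lines[j]}")
--         prev = j
--     return result_lines, error_indices
-- ===== Notes on version B (the rewrite author's own statement) =====
-- stated objective: alternative
-- what changed: A expands each keyword hit into a set of context indices, sorts the set, merges consecutive indices into ranges and re-expands them for formatting; B never builds a set: it precomputes a per-line keyword mark list, selects each line index whose context window contains a marked line in one ordered scan, and emits the separator lines by detecting gaps between consecutive selected indices in a single output pass.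
import Mathlib
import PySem

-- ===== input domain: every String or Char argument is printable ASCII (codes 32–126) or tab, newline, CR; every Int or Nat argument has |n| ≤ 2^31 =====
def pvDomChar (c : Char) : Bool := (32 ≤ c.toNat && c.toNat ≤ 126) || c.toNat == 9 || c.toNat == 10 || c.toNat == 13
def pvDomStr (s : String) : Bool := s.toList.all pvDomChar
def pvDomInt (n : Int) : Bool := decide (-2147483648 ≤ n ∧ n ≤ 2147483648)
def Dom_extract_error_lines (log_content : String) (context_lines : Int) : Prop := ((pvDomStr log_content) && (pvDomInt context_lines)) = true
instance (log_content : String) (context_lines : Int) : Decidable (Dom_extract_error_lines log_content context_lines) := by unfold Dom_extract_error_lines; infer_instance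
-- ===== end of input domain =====

-- B replaces A's index-set + sort + interval-merge pipeline by a per-line window test over a
-- precomputed keyword-mark list and a single gap-detecting output pass (objective: alternative).

-- shared constants / formatting (identical code in both Pythons)
def pvErrorKeywords : List String :=
  ["error", "ERROR", "Error", "failed", "FAILED", "Failed", "fatal", "FATAL", "Fatal"]

-- "..." + "=" * 70 + "..."
def pvSep : String := "..." ++ String.ofList (List.replicate 70 '=') ++ "..."

-- right-aligned in width 6: the "{m:6d}" field
def pvPad6 (m : Int) : String :=
  let s := PySem.Int.toStr m
  String.ofList (List.replicate (6 - s.toList.length) ' ' ++ s.toList)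

-- f"[Line {i+1:6d}] {line}"
def pvFmtLine (i : Int) (line : String) : String :=
  "[Line " ++ pvPad6 (i + 1) ++ "] " ++ line

-- ===== PORT A =====
-- A's inner loop 'for keyword in …: if keyword in line: …; break' runs its
-- (keyword-independent) body once iff some keyword occurs; this mirrors the scan-with-break.
def pvKwHit : List String → String → Bool
  | [], _ => false
  | k :: t, line => if PySem.Str.isIn k line then true else pvKwHit t line

-- A's body after 'lines = log_content.split("\n")'
def pvBodyA (lines : List String) (context_lines : Int) : List String × List Int :=
  let errorIndices : PySem.Set Int :=
    (PySem.List.enumerate lines).foldl (fun s p =>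
      if pvKwHit pvErrorKeywords p.2 then
        PySem.Set.update s (PySem.List.pyRange (max 0 (p.1 - context_lines))
                   (min (lines.length : Int) (p.1 + context_lines + 1)))
      else s) PySem.Set.empty
  let ei := PySem.List.sorted errorIndices (fun x => x)
  match ei with
  | [] => ([], [])
  | h :: t =>
    let st := t.foldl (fun (st : List (Int × Int) × Int × Int) idx =>
        if idx = st.2.2 + 1 then (st.1, st.2.1, idx)
        else (st.1 ++ [(st.2.1, st.2.2)], idx, idx)) ([], h, h)
    let mergedRanges := st.1 ++ [st.2]
    let resultLines := mergedRanges.foldl (fun res r =>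
        (PySem.List.pyRange r.1 (r.2 + 1)).foldl
          (fun res2 i => res2 ++ [pvFmtLine i (PySem.List.pyGetD lines i "")])
          (if res = [] then res else res ++ [pvSep])) []
    (resultLines, h :: t)

def extract_error_lines (log_content : String) (context_lines : Int) : List String × List Int :=
  -- '\n' ≠ "", so split? never returns none
  pvBodyA ((PySem.Str.split? log_content "\n").getD []) context_lines

-- ===== PORT B =====
-- near_error(j)
def pvNear (mark : List Bool) (n : Nat) (context_lines j : Int) : Bool :=
  let lo := max 0 (j - context_lines)
  let hi := min (n : Int) (j + context_lines + 1)
  lo < hi && (PySem.List.slice mark (some lo) (some hi)).any id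

-- B's body after 'lines = log_content.split("\n")'
def pvBodyB (lines : List String) (context_lines : Int) : List String × List Int :=
  let n := lines.length
  let mark := lines.map (fun line => pvErrorKeywords.any (fun kw => PySem.Str.isIn kw line))
  let errorIndices := (PySem.List.pyRange 0 (n : Int)).filter (pvNear mark n context_lines)
  let res := errorIndices.foldl (fun (st : List String × Option Int) j =>
      let withSep := if st.1 ≠ [] ∧ st.2.map (· + 1) ≠ some j then st.1 ++ [pvSep] else st.1
      (withSep ++ [pvFmtLine j (PySem.List.pyGetD lines j "")], some j)) ([], none)
  (res.1, errorIndices)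

def extract_error_lines_alt (log_content : String) (context_lines : Int) : List String × List Int :=
  pvBodyB ((PySem.Str.split? log_content "\n").getD []) context_lines

-- ===== PRECONDITION & SPEC =====
def Spec_extract_error_lines (log_content : String) (context_lines : Int) (out : List String × List Int) : Prop := out = extract_error_lines_alt log_content context_lines
instance (log_content : String) (context_lines : Int) (out : List String × List Int) : Decidable (Spec_extract_error_lines log_content context_lines out) := by unfold Spec_extract_error_lines; infer_instance

-- ===== CLAIM (what is proved, stated in full; the proofs are below) =====
def Claim_equal_extract_error_lines : Prop := ∀ (log_content : String) (context_lines : Int), Dom_extract_error_lines log_content context_lines → Spec_extract_error_lines log_content context_lines (extract_error_lines log_content context_lines)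

-- ===== LEMMAS AND PROOFS =====

-- A's keyword scan-with-break is B's 'any'
theorem pvKwHit_eq_any (kws : List String) (line : String) :
    pvKwHit kws line = kws.any (fun kw => PySem.Str.isIn kw line) := by
  induction kws with
  | nil => rfl
  | cons k t ih =>
    rw [List.any_cons, ← ih]
    simp [pvKwHit]

-- membership in the index set A accumulates
theorem pv_mem_setfold (c N : Int) (l : List (Int × String)) (s : PySem.Set Int) (j : Int) :
    (j ∈ l.foldl (fun s p =>
      if pvKwHit pvErrorKeywords p.2 then
        PySem.Set.update s (PySem.List.pyRange (max 0 (p.1 - c)) (min N (p.1 + c + 1)))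
      else s) s) ↔
    j ∈ s ∨ ∃ p ∈ l, pvKwHit pvErrorKeywords p.2 = true ∧ max 0 (p.1 - c) ≤ j ∧ j < min N (p.1 + c + 1) := by
  induction l generalizing s with
  | nil => simp
  | cons q t ih =>
    simp only [List.foldl_cons, ih]
    by_cases hq : pvKwHit pvErrorKeywords q.2
    · simp [hq, PySem.Set.mem_update, PySem.List.mem_pyRange_one, or_assoc]
    · simp [hq]

theorem pv_nodup_setfold (c N : Int) (l : List (Int × String)) (s : PySem.Set Int) (h : s.Nodup) :
    (l.foldl (fun s p =>
      if pvKwHit pvErrorKeywords p.2 then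
        PySem.Set.update s (PySem.List.pyRange (max 0 (p.1 - c)) (min N (p.1 + c + 1)))
      else s) s).Nodup := by
  induction l generalizing s with
  | nil => exact h
  | cons q t ih =>
    simp only [List.foldl_cons]
    by_cases hq : pvKwHit pvErrorKeywords q.2
    · simp only [hq, if_true]; exact ih _ (PySem.Set.nodup_update _ _ h)
    · simpa [hq] using ih _ h

-- any() over a slice of a boolean list is an indexed existential
theorem pv_any_slice (xs : List Bool) (lo hi : Int) (h0 : 0 ≤ lo) (hlt : lo < hi)
    (hn : hi ≤ (xs.length : Int)) :
    ((PySem.List.slice xs (some lo) (some hi)).any id = true ↔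
      ∃ k : Nat, lo ≤ (k : Int) ∧ (k : Int) < hi ∧ xs[k]? = some true) := by
  rw [PySem.List.slice_toNat xs h0 (by omega)]
  rw [List.any_eq_true]
  constructor
  · rintro ⟨b, hb, hbid⟩
    rw [List.mem_iff_getElem] at hb
    obtain ⟨i, hi2, hval⟩ := hb
    simp only [List.getElem_take, List.getElem_drop] at hval
    have hlen : i < (List.take (hi.toNat - lo.toNat) (List.drop lo.toNat xs)).length := hi2
    simp only [List.length_take, List.length_drop] at hlen
    refine ⟨lo.toNat + i, by omega, by omega, ?_⟩
    have hlt2 : lo.toNat + i < xs.length := by omega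
    rw [List.getElem?_eq_getElem hlt2, hval]
    simpa using hbid
  · rintro ⟨k, hk1, hk2, hk3⟩
    have hklen : k < xs.length := by
      by_contra hc
      rw [List.getElem?_eq_none (by omega)] at hk3
      simp at hk3
    refine ⟨true, ?_, rfl⟩
    rw [List.mem_iff_getElem]
    refine ⟨k - lo.toNat, ?_, ?_⟩
    · simp only [List.length_take, List.length_drop]; omega
    · rw [List.getElem?_eq_getElem hklen] at hk3
      have hv : xs[k] = true := by simpa using hk3
      simp only [List.getElem_take, List.getElem_drop]
      have h2 : lo.toNat + (k - lo.toNat) = k := by omega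
      simp only [h2] at *
      exact hv

-- B's window test picks exactly the indices A's expanded ranges cover
theorem pv_near_iff (L : List String) (c j : Int) (hj0 : 0 ≤ j) (hjn : j < (L.length : Int)) :
    (pvNear (L.map (fun line => pvErrorKeywords.any (fun kw => PySem.Str.isIn kw line)))
      L.length c j = true) ↔
    ∃ k : Nat, ∃ _ : k < L.length, pvKwHit pvErrorKeywords L[k] = true ∧
      max 0 ((k : Int) - c) ≤ j ∧ j < min (L.length : Int) ((k : Int) + c + 1) := by
  unfold pvNear
  simp only [Bool.and_eq_true, decide_eq_true_eq]
  by_cases hlt : max 0 (j - c) < min (L.length : Int) (j + c + 1)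
  · rw [pv_any_slice _ _ _ (by omega) hlt (by simp)]
    constructor
    · rintro ⟨-, k, hk1, hk2, hk3⟩
      rw [List.getElem?_map] at hk3
      have hklen : k < L.length := by
        by_contra hc
        rw [List.getElem?_eq_none (by omega)] at hk3
        simp at hk3
      rw [List.getElem?_eq_getElem hklen] at hk3
      simp only [Option.map_some, Option.some.injEq] at hk3
      refine ⟨k, hklen, ?_, by omega, by omega⟩
      rw [pvKwHit_eq_any]
      exact hk3
    · rintro ⟨k, hklen, hkw, hb1, hb2⟩
      refine ⟨hlt, k, by omega, by omega, ?_⟩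
      rw [List.getElem?_map, List.getElem?_eq_getElem hklen]
      simp only [Option.map_some, Option.some.injEq]
      rw [pvKwHit_eq_any] at hkw
      exact hkw
  · constructor
    · rintro ⟨h, -⟩; exact absurd h hlt
    · rintro ⟨k, hklen, hkw, hb1, hb2⟩
      exact absurd (by omega : max 0 (j - c) < min (L.length : Int) (j + c + 1)) hlt

-- A's sorted index set IS B's filtered range
theorem pv_ei_eq (L : List String) (c : Int) :
    PySem.List.sorted
      ((PySem.List.enumerate L).foldl (fun s p =>
        if pvKwHit pvErrorKeywords p.2 then
          PySem.Set.update s (PySem.List.pyRange (max 0 (p.1 - c))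
            (min (L.length : Int) (p.1 + c + 1)))
        else s) PySem.Set.empty) (fun x => x) =
    (PySem.List.pyRange 0 (L.length : Int)).filter
      (pvNear (L.map (fun line => pvErrorKeywords.any (fun kw => PySem.Str.isIn kw line)))
        L.length c) := by
  apply PySem.List.sorted_eq_of_perm_of_pairwise_lt
  · refine (List.perm_ext_iff_of_nodup
      ((PySem.List.nodup_pyRange_one _ _).filter _)
      (pv_nodup_setfold c (L.length : Int) _ _ (by simp [PySem.Set.empty]))).mpr ?_
    intro a
    rw [List.mem_filter, pv_mem_setfold]
    simp only [PySem.List.mem_pyRange_one, PySem.Set.empty]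
    constructor
    · rintro ⟨⟨ha0, han⟩, hnear⟩
      rw [pv_near_iff L c a ha0 han] at hnear
      obtain ⟨k, hklen, hkw, hb1, hb2⟩ := hnear
      refine Or.inr ⟨((k : Int), L[k]), ?_, hkw, hb1, hb2⟩
      rw [PySem.List.mem_enumerate_iff]
      exact ⟨k, hklen, by simp⟩
    · rintro (h | ⟨p, hp, hkw, hb1, hb2⟩)
      · simp at h
      · rw [PySem.List.mem_enumerate_iff] at hp
        obtain ⟨k, hklen, rfl⟩ := hp
        simp only [zero_add] at hkw hb1 hb2 ⊢
        have ha0 : 0 ≤ a := le_trans (le_max_left _ _) hb1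
        have han : a < (L.length : Int) := lt_of_lt_of_le hb2 (min_le_left _ _)
        refine ⟨⟨ha0, han⟩, ?_⟩
        rw [pv_near_iff L c a ha0 han]
        exact ⟨k, hklen, hkw, hb1, hb2⟩
  · exact (PySem.List.pairwise_lt_pyRange_one _ _).filter _

-- recursion form of A's merge loop
def pvMergeRec (s e : Int) : List Int → List (Int × Int)
  | [] => [(s, e)]
  | j :: t => if j = e + 1 then pvMergeRec s j t else (s, e) :: pvMergeRec j j t

-- recursion form of B's gap-separated output pass
def pvGapGo (L : List String) (e : Int) : List Int → List String
  | [] => []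
  | j :: t => (if j = e + 1 then ([] : List String) else [pvSep]) ++
      pvFmtLine j (PySem.List.pyGetD L j "") :: pvGapGo L j t

def pvBlock (L : List String) (r : Int × Int) : List String :=
  (PySem.List.pyRange r.1 (r.2 + 1)).map (fun i => pvFmtLine i (PySem.List.pyGetD L i ""))

theorem pv_merge_foldl (t : List Int) (mr : List (Int × Int)) (s e : Int) :
    ((t.foldl (fun (st : List (Int × Int) × Int × Int) idx =>
        if idx = st.2.2 + 1 then (st.1, st.2.1, idx)
        else (st.1 ++ [(st.2.1, st.2.2)], idx, idx)) (mr, s, e)).1 ++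
     [(t.foldl (fun (st : List (Int × Int) × Int × Int) idx =>
        if idx = st.2.2 + 1 then (st.1, st.2.1, idx)
        else (st.1 ++ [(st.2.1, st.2.2)], idx, idx)) (mr, s, e)).2]) = mr ++ pvMergeRec s e t := by
  induction t generalizing mr s e with
  | nil => simp [pvMergeRec]
  | cons j t ih =>
    simp only [List.foldl_cons, pvMergeRec]
    by_cases h : j = e + 1
    · simp only [h, if_true, ih]
    · simp only [ih, if_neg h, List.append_assoc, List.cons_append, List.nil_append]

theorem pv_block_ne_nil (L : List String) (s e : Int) (h : s ≤ e) : pvBlock L (s, e) ≠ [] := by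
  unfold pvBlock
  simp only [ne_eq, List.map_eq_nil_iff]
  intro hc
  have := congrArg List.length hc
  rw [PySem.List.length_pyRange_one] at this
  simp at this
  omega

theorem pv_block_snoc (L : List String) (s e : Int) (h : s ≤ e) :
    pvBlock L (s, e + 1) = pvBlock L (s, e) ++ [pvFmtLine (e + 1) (PySem.List.pyGetD L (e + 1) "")] := by
  unfold pvBlock
  rw [show e + 1 + 1 = (e + 1) + 1 from rfl, PySem.List.pyRange_one_succ_right (by omega)]
  simp

theorem pv_block_single (L : List String) (s : Int) :
    pvBlock L (s, s) = [pvFmtLine s (PySem.List.pyGetD L s "")] := by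
  unfold pvBlock
  rw [PySem.List.pyRange_one_singleton]
  simp

theorem pv_fmt_step (L : List String) (res : List String) (s e : Int) :
    (PySem.List.pyRange s (e + 1)).foldl
      (fun res2 i => res2 ++ [pvFmtLine i (PySem.List.pyGetD L i "")])
      (if res = [] then res else res ++ [pvSep])
    = (if res = [] then res else res ++ [pvSep]) ++ pvBlock L (s, e) := by
  rw [PySem.List.foldl_append_singleton_eq_map]
  rfl

-- A's merge-then-format equals the gap-separated pass, for any index list
theorem pv_fmt_merge (L : List String) (t : List Int) (s e : Int) (res : List String) (h : s ≤ e) :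
    (pvMergeRec s e t).foldl (fun res r =>
        (PySem.List.pyRange r.1 (r.2 + 1)).foldl
          (fun res2 i => res2 ++ [pvFmtLine i (PySem.List.pyGetD L i "")])
          (if res = [] then res else res ++ [pvSep])) res
    = (if res = [] then res else res ++ [pvSep]) ++ pvBlock L (s, e) ++ pvGapGo L e t := by
  induction t generalizing s e res with
  | nil =>
    simp only [pvMergeRec, List.foldl_cons, List.foldl_nil, pvGapGo, List.append_nil]
    rw [pv_fmt_step]
  | cons j t ih =>
    by_cases hj : j = e + 1
    · rw [show pvMergeRec s e (j :: t) = pvMergeRec s j t by simp [pvMergeRec, hj]]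
      rw [ih s j res (by omega)]
      subst hj
      rw [pv_block_snoc L s e h]
      simp [pvGapGo]
    · rw [show pvMergeRec s e (j :: t) = (s, e) :: pvMergeRec j j t by simp [pvMergeRec, hj]]
      rw [List.foldl_cons, pv_fmt_step, ih j j _ le_rfl]
      have hne : (if res = [] then res else res ++ [pvSep]) ++ pvBlock L (s, e) ≠ [] := by
        intro hc
        exact pv_block_ne_nil L s e h (List.append_eq_nil_iff.mp hc).2
      rw [if_neg hne, pv_block_single]
      simp [pvGapGo, hj]

theorem pv_gap_foldl (L : List String) (t : List Int) (res : List String) (p : Int) (h : res ≠ []) :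
    (t.foldl (fun (st : List String × Option Int) j =>
      ((if st.1 ≠ [] ∧ st.2.map (· + 1) ≠ some j then st.1 ++ [pvSep] else st.1) ++
        [pvFmtLine j (PySem.List.pyGetD L j "")], some j)) (res, some p)).1
    = res ++ pvGapGo L p t := by
  induction t generalizing res p with
  | nil => simp [pvGapGo]
  | cons j t ih =>
    simp only [List.foldl_cons]
    by_cases hj : j = p + 1
    · rw [if_neg (by simp [hj])]
      rw [ih _ j (by simp)]
      simp [pvGapGo, hj]
    · rw [if_pos ⟨h, by simpa using fun hc => hj hc.symm⟩]
      rw [ih _ j (by simp)]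
      simp [pvGapGo, hj]

-- the two bodies agree on every line list
theorem pvCore (L : List String) (c : Int) : pvBodyA L c = pvBodyB L c := by
  simp only [pvBodyA, pvBodyB]
  rw [pv_ei_eq]
  cases hE : (PySem.List.pyRange 0 (L.length : Int)).filter
      (pvNear (L.map (fun line => pvErrorKeywords.any (fun kw => PySem.Str.isIn kw line)))
        L.length c) with
  | nil => simp
  | cons h t =>
    refine Prod.ext ?_ rfl
    show _ = (List.foldl _ ([], none) (h :: t)).1
    rw [List.foldl_cons]
    simp only []
    rw [if_neg (by simp)]
    rw [List.nil_append, pv_gap_foldl L t _ h (by simp)]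
    rw [pv_merge_foldl t [] h h, List.nil_append]
    rw [pv_fmt_merge L t h h [] le_rfl]
    rw [if_pos rfl, pv_block_single]
    simp

-- ===== VERDICT (by name: the statement is the Claim_ definition above) =====
theorem extract_error_lines_spec : Claim_equal_extract_error_lines := by
  intro log_content context_lines _
  show _ = _
  unfold extract_error_lines extract_error_lines_alt
  exact pvCore _ _
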